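-- pv_equiv track=rewrite | github.com/ldfdev/CodeForces-Div2-Problems | 1537E2.py | determine_initial_prefix
-- ===== SOURCE A (Python) =====
-- def validate_prefix(s, prefix):
--     n = len(s)
--     source = 0
--     for i in range(prefix, n):
--         if s[i] > s[source]:
--             return prefix
--         elif s[i] == s[source]:
--             source += 1
--             if source == prefix:
--                 source = 0
--             continue
--         assert s[i] < s[source]
--         prefix = i + 1
--         source = 0
--     return prefix
--
-- def determine_initial_prefix(s):
--     prefix = 1
--     while True:
--         new_prefix = validate_prefix(s, prefix)
--         if new_prefix == prefix:
--             break
--         prefix = new_prefix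
--     return prefix
-- ===== SOURCE B (Python) =====
-- def determine_initial_prefix(s):
--     # Single pass: modulo indexing replaces the manually wrapped comparison index, and
--     # one scan replaces the fixpoint re-iteration of validate_prefix.
--     p = 1
--     for i in range(1, len(s)):
--         if s[i] > s[i % p]:
--             break
--         if s[i] < s[i % p]:
--             p = i + 1
--     return p
-- ===== Notes on version B (the rewrite author's own statement) =====
-- stated objective: simpler
-- what changed: replaces A's helper with its manually wrapped comparison index and the outer while-loop that re-runs validate_prefix until a fixpoint by one single for-loop comparing s[i] with s[i % p], after proving that one scan already reaches the fixpoint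
import Mathlib
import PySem

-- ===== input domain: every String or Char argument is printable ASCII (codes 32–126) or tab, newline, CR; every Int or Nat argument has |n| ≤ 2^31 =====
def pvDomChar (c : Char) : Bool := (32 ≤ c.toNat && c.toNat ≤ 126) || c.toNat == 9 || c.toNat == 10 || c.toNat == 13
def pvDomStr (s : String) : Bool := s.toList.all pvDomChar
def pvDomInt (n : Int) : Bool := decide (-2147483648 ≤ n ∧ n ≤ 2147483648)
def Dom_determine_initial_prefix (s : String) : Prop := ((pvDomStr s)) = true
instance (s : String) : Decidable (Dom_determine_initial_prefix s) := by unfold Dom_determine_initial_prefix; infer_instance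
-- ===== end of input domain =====

-- B replaces A's manually wrapped comparison index and the outer fixpoint
-- re-iteration of validate_prefix by one single pass using i % p (objective: simpler).

-- ===== PORT A =====
-- the for-loop of validate_prefix: i runs from `i` to n-1, state (source, pfx)
def vpLoop (l : List Char) (n i source pfx : Nat) : Nat :=
  if _h : i < n then
    if l.getD source ' ' < l.getD i ' ' then pfx
    else if l.getD i ' ' = l.getD source ' ' then
      vpLoop l n (i + 1) (if source + 1 = pfx then 0 else source + 1) pfx
    else
      vpLoop l n (i + 1) 0 (i + 1)
  else pfx
termination_by n - i

def validatePrefix (l : List Char) (pfx : Nat) : Nat :=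
  vpLoop l l.length pfx 0 pfx

-- the `while True` loop; fuel n+2 suffices because validate_prefix's result is
-- strictly larger than its argument whenever it differs and is bounded by n,
-- so the fuel guard only makes the loop total (it is never exhausted)
def goA (l : List Char) (fuel pfx : Nat) : Nat :=
  match fuel with
  | 0 => pfx
  | fuel + 1 =>
      let np := validatePrefix l pfx
      if np = pfx then pfx else goA l fuel np

def determine_initial_prefix (s : String) : Int :=
  ((goA s.toList (s.toList.length + 2) 1 : Nat) : Int)

-- ===== PORT B =====
def bLoop (l : List Char) (n i p : Nat) : Nat :=
  if _h : i < n then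
    if l.getD (i % p) ' ' < l.getD i ' ' then p
    else if l.getD i ' ' < l.getD (i % p) ' ' then bLoop l n (i + 1) (i + 1)
    else bLoop l n (i + 1) p
  else p
termination_by n - i

def determine_initial_prefix_alt (s : String) : Int :=
  ((bLoop s.toList s.toList.length 1 1 : Nat) : Int)

-- ===== PRECONDITION & SPEC =====
def Spec_determine_initial_prefix (s : String) (out : Int) : Prop := out = determine_initial_prefix_alt s
instance (s : String) (out : Int) : Decidable (Spec_determine_initial_prefix s out) := by unfold Spec_determine_initial_prefix; infer_instance

-- ===== CLAIM (what is proved, stated in full; the proofs are below) =====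
def Claim_equal_determine_initial_prefix : Prop := ∀ (s : String), Dom_determine_initial_prefix s → Spec_determine_initial_prefix s (determine_initial_prefix s)

-- ===== LEMMAS AND PROOFS =====

-- invariant: A's wrapped comparison index always equals i % pfx, so the loop of
-- validate_prefix computes exactly B's single pass
theorem vpLoop_eq_bLoop (l : List Char) (n : Nat) :
    ∀ k i p, n - i ≤ k → 1 ≤ p → p ≤ i → vpLoop l n i (i % p) p = bLoop l n i p := by
  intro k
  induction k with
  | zero =>
      intro i p hk _ _
      rw [vpLoop.eq_def, bLoop.eq_def]
      rw [dif_neg (show ¬ i < n by omega), dif_neg (show ¬ i < n by omega)]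
  | succ k ih =>
      intro i p hk hp hpi
      rw [vpLoop.eq_def, bLoop.eq_def]
      by_cases h : i < n
      · rw [dif_pos h, dif_pos h]
        by_cases h1 : l.getD (i % p) ' ' < l.getD i ' '
        · rw [if_pos h1, if_pos h1]
        · rw [if_neg h1, if_neg h1]
          by_cases h2 : l.getD i ' ' = l.getD (i % p) ' '
          · have h3 : ¬ l.getD i ' ' < l.getD (i % p) ' ' := by
              rw [h2]; exact lt_irrefl _
            have hwrap : (if i % p + 1 = p then 0 else i % p + 1) = (i + 1) % p := by
              rcases eq_or_lt_of_le hp with hp1 | hp2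
              · rw [← hp1]; simp [Nat.mod_one]
              · have h1p : 1 % p = 1 := Nat.mod_eq_of_lt hp2
                have hip : i % p < p := Nat.mod_lt _ (by omega)
                by_cases hw : i % p + 1 = p
                · rw [if_pos hw, Nat.add_mod, h1p, hw, Nat.mod_self]
                · rw [if_neg hw]
                  have hm : (i + 1) % p = (i % p + 1 % p) % p := Nat.add_mod i 1 p
                  rw [hm, h1p, Nat.mod_eq_of_lt (show i % p + 1 < p by omega)]
            rw [if_pos h2, if_neg h3, hwrap]
            exact ih (i + 1) p (by omega) hp (by omega)
          · have h3 : l.getD i ' ' < l.getD (i % p) ' ' :=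
              lt_of_le_of_ne (le_of_not_gt h1) h2
            rw [if_neg h2, if_pos h3]
            have := ih (i + 1) (i + 1) (by omega) (by omega) (le_refl _)
            rwa [Nat.mod_self] at this
      · rw [dif_neg h, dif_neg h]

-- re-running validate_prefix's loop from a changed result is a fixpoint:
-- after the last assignment pfx := i+1 the loop state equals the initial
-- state of the re-run, and pfx never changes again
theorem vpLoop_idem (l : List Char) (n : Nat) :
    ∀ k i source p q, n - i ≤ k → vpLoop l n i source p = q → q ≠ p →
      vpLoop l n q 0 q = q := by
  intro k
  induction k with
  | zero =>
      intro i source p q hk hrun hne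
      rw [vpLoop.eq_def, dif_neg (show ¬ i < n by omega)] at hrun
      exact absurd hrun.symm hne
  | succ k ih =>
      intro i source p q hk hrun hne
      rw [vpLoop.eq_def] at hrun
      by_cases h : i < n
      · rw [dif_pos h] at hrun
        by_cases h1 : l.getD source ' ' < l.getD i ' '
        · rw [if_pos h1] at hrun
          exact absurd hrun.symm hne
        · rw [if_neg h1] at hrun
          by_cases h2 : l.getD i ' ' = l.getD source ' '
          · rw [if_pos h2] at hrun
            exact ih (i + 1) _ p q (by omega) hrun hne
          · rw [if_neg h2] at hrun
            by_cases hq : q = i + 1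
            · rw [hq] at hrun ⊢
              exact hrun
            · exact ih (i + 1) 0 (i + 1) q (by omega) hrun hq
      · rw [dif_neg h] at hrun
        exact absurd hrun.symm hne

-- one unfolding of the while-loop
theorem goA_succ (l : List Char) (fuel pfx : Nat) :
    goA l (fuel + 1) pfx =
      if validatePrefix l pfx = pfx then pfx else goA l fuel (validatePrefix l pfx) := rfl

-- the whole of A equals the whole of B
theorem goA_eq (l : List Char) : goA l (l.length + 2) 1 = bLoop l l.length 1 1 := by
  have hB : validatePrefix l 1 = bLoop l l.length 1 1 := by
    unfold validatePrefix
    have := vpLoop_eq_bLoop l l.length l.length 1 1 (by omega) (le_refl 1) (le_refl 1)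
    rwa [Nat.mod_self] at this
  rw [← hB]
  show goA l (l.length + 1 + 1) 1 = validatePrefix l 1
  rw [goA_succ]
  by_cases h1 : validatePrefix l 1 = 1
  · rw [if_pos h1, h1]
  · rw [if_neg h1, goA_succ]
    have hfix : validatePrefix l (validatePrefix l 1) = validatePrefix l 1 := by
      unfold validatePrefix at h1 ⊢
      exact vpLoop_idem l l.length l.length 1 0 1 _ (by omega) rfl h1
    rw [if_pos hfix]

-- ===== VERDICT (by name: the statement is the Claim_ definition above) =====
theorem determine_initial_prefix_spec : Claim_equal_determine_initial_prefix := by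
  intro s _
  unfold Spec_determine_initial_prefix determine_initial_prefix determine_initial_prefix_alt
  exact_mod_cast congrArg (Nat.cast : Nat → Int) (goA_eq s.toList)
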